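-- pv_equiv track=rewrite | github.com/Soham112/Contendo | backend/agents/consolidation_agent.py | _build_consolidation_input
-- ===== SOURCE A (Python) =====
-- MAX_CHUNKS_PER_ENTITY = 12
--
-- MAX_WORDS_PER_CHUNK = 80
--
-- def _build_consolidation_input(
--     entity_name: str,
--     chunks: list[dict],
-- ) -> str:
--     """Group chunks by memory_context bucket and format them for Haiku input."""
--     buckets: dict[str, list[str]] = {
--         "work": [],
--         "personal_project": [],
--         "learning": [],
--         "observation": [],
--         "legacy": [],
--     }
--
--     for chunk in chunks[:MAX_CHUNKS_PER_ENTITY]: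
--         ctx = chunk.get("memory_context") or "legacy"
--         if ctx not in buckets:
--             ctx = "legacy"
--         excerpt = " ".join((chunk.get("text") or chunk.get("content", "")).split()[:MAX_WORDS_PER_CHUNK])
--         if excerpt:
--             buckets[ctx].append(excerpt)
--
--     lines = [f'Everything this person knows about "{entity_name}":\n']
--
--     if buckets["work"]:
--         lines.append("WORK CONTEXT (professional experience):")
--         for i, ex in enumerate(buckets["work"][:4], 1):
--             lines.append(f"  {i}. {ex}")
--
--     if buckets["personal_project"]:
--         lines.append("PERSONAL PROJECT CONTEXT:")
--         for i, ex in enumerate(buckets["personal_project"][:4], 1):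
--             lines.append(f"  {i}. {ex}")
--
--     if buckets["learning"]:
--         lines.append("LEARNED FROM EXTERNAL SOURCES (articles, videos):")
--         for i, ex in enumerate(buckets["learning"][:4], 1):
--             lines.append(f"  {i}. {ex}")
--
--     if buckets["observation"]:
--         lines.append("OBSERVATIONS (patterns noticed):")
--         for i, ex in enumerate(buckets["observation"][:3], 1):
--             lines.append(f"  {i}. {ex}")
--
--     if buckets["legacy"]:
--         lines.append("OTHER:")
--         for i, ex in enumerate(buckets["legacy"][:3], 1):
--             lines.append(f"  {i}. {ex}")
--
--     return "\n".join(lines)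
-- ===== SOURCE B (Python) =====
-- MAX_CHUNKS_PER_ENTITY = 12
--
-- MAX_WORDS_PER_CHUNK = 80
--
-- SECTIONS = [
--     ("work", "WORK CONTEXT (professional experience):", 4),
--     ("personal_project", "PERSONAL PROJECT CONTEXT:", 4),
--     ("learning", "LEARNED FROM EXTERNAL SOURCES (articles, videos):", 4),
--     ("observation", "OBSERVATIONS (patterns noticed):", 3),
--     ("legacy", "OTHER:", 3),
-- ]
--
-- _KNOWN = {key for key, _, _ in SECTIONS}
--
--
-- def _classify(chunk):
--     ctx = chunk.get("memory_context") or "legacy"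
--     return ctx if ctx in _KNOWN else "legacy"
--
--
-- def _excerpt(chunk):
--     text = chunk.get("text") or chunk.get("content", "")
--     return " ".join(text.split()[:MAX_WORDS_PER_CHUNK])
--
--
-- def _build_consolidation_input(entity_name, chunks):
--     rows = [
--         (_classify(chunk), _excerpt(chunk))
--         for chunk in chunks[:MAX_CHUNKS_PER_ENTITY]
--         if _excerpt(chunk)
--     ]
--     lines = [f'Everything this person knows about "{entity_name}":\n']
--     for key, header, cap in SECTIONS:
--         items = [ex for k, ex in rows if k == key][:cap]
--         if items:
--             lines.append(header)
--             lines.extend(f"  {i}. {ex}" for i, ex in enumerate(items, 1))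
--     return "\n".join(lines)
-- ===== Notes on version B (the rewrite author's own statement) =====
-- stated objective: simpler
-- what changed: Replaces the dict-of-buckets mutated in a loop plus five hand-unrolled if-blocks with a flat list of (bucket, excerpt) rows and one table-driven loop over an ordered SECTIONS spec (key, header, cap) that filters and caps each section.
import Mathlib
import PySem

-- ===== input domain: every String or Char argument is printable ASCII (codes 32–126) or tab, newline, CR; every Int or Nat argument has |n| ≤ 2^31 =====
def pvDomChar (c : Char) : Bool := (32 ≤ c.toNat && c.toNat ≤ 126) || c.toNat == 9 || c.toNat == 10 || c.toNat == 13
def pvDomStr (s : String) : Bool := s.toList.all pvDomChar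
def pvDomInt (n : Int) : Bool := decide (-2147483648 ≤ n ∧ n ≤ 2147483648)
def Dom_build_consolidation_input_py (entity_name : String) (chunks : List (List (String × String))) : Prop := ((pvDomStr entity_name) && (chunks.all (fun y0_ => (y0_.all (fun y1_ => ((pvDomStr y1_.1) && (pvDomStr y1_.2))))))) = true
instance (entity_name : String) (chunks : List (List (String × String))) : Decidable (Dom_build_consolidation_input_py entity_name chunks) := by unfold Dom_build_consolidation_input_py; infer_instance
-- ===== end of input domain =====

-- B replaces A's dict-of-buckets plus five hand-unrolled if-blocks by a flat tagged row list
-- and one table-driven loop over an ordered section spec (objective: simpler).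


-- shared primitives of both pythons, ported once:
-- pvCtx0 chunk = chunk.get("memory_context") or "legacy"
def pvCtx0 (chunk : List (String × String)) : String :=
  match List.lookup "memory_context" chunk with
  | some s => if s = "" then "legacy" else s
  | none => "legacy"

-- pvText chunk = chunk.get("text") or chunk.get("content", "")
def pvText (chunk : List (String × String)) : String :=
  match List.lookup "text" chunk with
  | some s => if s = "" then (List.lookup "content" chunk).getD "" else s
  | none => (List.lookup "content" chunk).getD ""

-- ===== PORT A =====
-- A: a dict of five bucket lists, filled by a loop over chunks[:12], then five unrolled if-blocks.
-- pvStepA is the body of A's `for chunk in chunks[:MAX_CHUNKS_PER_ENTITY]:` loop, step for step.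
def pvStepA (d : PySem.Dict String (List String)) (chunk : List (String × String)) : PySem.Dict String (List String) :=
  let ctx := if d.contains (pvCtx0 chunk) then pvCtx0 chunk else "legacy"
  let excerpt := PySem.Str.join " " (PySem.List.slice (PySem.Str.split₀ (pvText chunk)) none (some 80))
  if excerpt ≠ "" then d.modify ctx [] (· ++ [excerpt]) else d

def build_consolidation_input_py (entity_name : String) (chunks : List (List (String × String))) : String :=
  let buckets0 : PySem.Dict String (List String) :=
    PySem.Dict.mk [("work", []), ("personal_project", []), ("learning", []), ("observation", []), ("legacy", [])]
  let buckets := (PySem.List.slice chunks none (some 12)).foldl pvStepA buckets0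
  let lines0 := ["Everything this person knows about \"" ++ entity_name ++ "\":\n"]
  let lines1 :=
    if buckets.getD "work" [] ≠ [] then
      lines0 ++ ["WORK CONTEXT (professional experience):"]
        ++ (PySem.List.enumerate (PySem.List.slice (buckets.getD "work" []) none (some 4)) 1).map
            (fun p => "  " ++ PySem.Int.toStr p.1 ++ ". " ++ p.2)
    else lines0
  let lines2 :=
    if buckets.getD "personal_project" [] ≠ [] then
      lines1 ++ ["PERSONAL PROJECT CONTEXT:"]
        ++ (PySem.List.enumerate (PySem.List.slice (buckets.getD "personal_project" []) none (some 4)) 1).map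
            (fun p => "  " ++ PySem.Int.toStr p.1 ++ ". " ++ p.2)
    else lines1
  let lines3 :=
    if buckets.getD "learning" [] ≠ [] then
      lines2 ++ ["LEARNED FROM EXTERNAL SOURCES (articles, videos):"]
        ++ (PySem.List.enumerate (PySem.List.slice (buckets.getD "learning" []) none (some 4)) 1).map
            (fun p => "  " ++ PySem.Int.toStr p.1 ++ ". " ++ p.2)
    else lines2
  let lines4 :=
    if buckets.getD "observation" [] ≠ [] then
      lines3 ++ ["OBSERVATIONS (patterns noticed):"]
        ++ (PySem.List.enumerate (PySem.List.slice (buckets.getD "observation" []) none (some 3)) 1).map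
            (fun p => "  " ++ PySem.Int.toStr p.1 ++ ". " ++ p.2)
    else lines3
  let lines5 :=
    if buckets.getD "legacy" [] ≠ [] then
      lines4 ++ ["OTHER:"]
        ++ (PySem.List.enumerate (PySem.List.slice (buckets.getD "legacy" []) none (some 3)) 1).map
            (fun p => "  " ++ PySem.Int.toStr p.1 ++ ". " ++ p.2)
    else lines4
  PySem.Str.join "\n" lines5

-- ===== PORT B =====
-- B: ordered section table (bucket key, header, cap), a flat list of tagged rows, one formatting loop.
def pvSections : List (String × String × Nat) :=
  [("work", "WORK CONTEXT (professional experience):", 4),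
   ("personal_project", "PERSONAL PROJECT CONTEXT:", 4),
   ("learning", "LEARNED FROM EXTERNAL SOURCES (articles, videos):", 4),
   ("observation", "OBSERVATIONS (patterns noticed):", 3),
   ("legacy", "OTHER:", 3)]

def pvClassify (chunk : List (String × String)) : String :=
  if pvCtx0 chunk ∈ PySem.Set.ofList (pvSections.map (fun sec => sec.1)) then pvCtx0 chunk else "legacy"

def pvExcerpt (chunk : List (String × String)) : String :=
  PySem.Str.join " " ((PySem.Str.split₀ (pvText chunk)).take 80)

def build_consolidation_input_py_alt (entity_name : String) (chunks : List (List (String × String))) : String :=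
  let rows : List (String × String) :=
    (chunks.take 12).filterMap (fun chunk =>
      if pvExcerpt chunk ≠ "" then some (pvClassify chunk, pvExcerpt chunk) else none)
  let lines :=
    pvSections.foldl (fun lines sec =>
      let items := ((rows.filter (fun r => r.1 == sec.1)).map (fun r => r.2)).take sec.2.2
      if items ≠ [] then
        lines ++ [sec.2.1]
          ++ (PySem.List.enumerate items 1).map (fun p => "  " ++ PySem.Int.toStr p.1 ++ ". " ++ p.2)
      else lines)
      ["Everything this person knows about \"" ++ entity_name ++ "\":\n"]
  PySem.Str.join "\n" lines

-- ===== PRECONDITION & SPEC =====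
def Spec_build_consolidation_input_py (entity_name : String) (chunks : List (List (String × String))) (out : String) : Prop := out = build_consolidation_input_py_alt entity_name chunks
instance (entity_name : String) (chunks : List (List (String × String))) (out : String) : Decidable (Spec_build_consolidation_input_py entity_name chunks out) := by unfold Spec_build_consolidation_input_py; infer_instance

-- ===== CLAIM (what is proved, stated in full; the proofs are below) =====
def Claim_equal_build_consolidation_input_py : Prop := ∀ (entity_name : String) (chunks : List (List (String × String))), Dom_build_consolidation_input_py entity_name chunks → Spec_build_consolidation_input_py entity_name chunks (build_consolidation_input_py entity_name chunks)

-- ===== LEMMAS AND PROOFS =====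

-- the rows B builds out of a chunk list
def pvRows (cs : List (List (String × String))) : List (String × String) :=
  cs.filterMap (fun chunk =>
    if pvExcerpt chunk ≠ "" then some (pvClassify chunk, pvExcerpt chunk) else none)

def pvKeyTest (s : String) : Bool :=
  ("work" == s) || (("personal_project" == s) || (("learning" == s) || (("observation" == s) || ("legacy" == s))))

theorem pvSlice80 (xs : List String) : PySem.List.slice xs none (some 80) = xs.take 80 :=
  PySem.List.slice_to xs (by norm_num)
theorem pvSlice12 (xs : List (List (String × String))) : PySem.List.slice xs none (some 12) = xs.take 12 :=
  PySem.List.slice_to xs (by norm_num)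
theorem pvSlice4 (xs : List String) : PySem.List.slice xs none (some 4) = xs.take 4 :=
  PySem.List.slice_to xs (by norm_num)
theorem pvSlice3 (xs : List String) : PySem.List.slice xs none (some 3) = xs.take 3 :=
  PySem.List.slice_to xs (by norm_num)

theorem pvTake4_eq_nil (xs : List String) : (xs.take 4 = []) = (xs = []) := by
  simp [List.take_eq_nil_iff]
theorem pvTake3_eq_nil (xs : List String) : (xs.take 3 = []) = (xs = []) := by
  simp [List.take_eq_nil_iff]

theorem pvKeyTest_iff (s : String) :
    pvKeyTest s = true ↔ s ∈ PySem.Set.ofList (pvSections.map (fun sec => sec.1)) := by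
  simp only [pvKeyTest, pvSections, PySem.Set.mem_ofList, List.map, List.mem_cons,
    List.not_mem_nil, or_false, Bool.or_eq_true, beq_iff_eq]
  constructor <;> intro hh <;> rcases hh with h|h|h|h|h <;> simp [h]

theorem pvClassify_eq (chunk : List (String × String)) :
    pvClassify chunk = if pvKeyTest (pvCtx0 chunk) then pvCtx0 chunk else "legacy" := by
  unfold pvClassify
  by_cases hk : pvKeyTest (pvCtx0 chunk) = true
  · rw [if_pos ((pvKeyTest_iff _).mp hk), if_pos hk]
  · rw [if_neg (fun hm => hk ((pvKeyTest_iff _).mpr hm)), if_neg hk]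

theorem pvExcerpt_eq (chunk : List (String × String)) :
    pvExcerpt chunk = PySem.Str.join " " (PySem.List.slice (PySem.Str.split₀ (pvText chunk)) none (some 80)) := by
  unfold pvExcerpt; rw [pvSlice80]

theorem pvClassify_mem (chunk : List (String × String)) : pvKeyTest (pvClassify chunk) = true := by
  rw [pvClassify_eq]
  by_cases hk : pvKeyTest (pvCtx0 chunk) = true
  · rw [if_pos hk]; exact hk
  · rw [if_neg hk]; rfl

-- under the keys invariant, A's loop step is a modify at B's classification with B's excerpt
theorem pvStepA_ctx (d : PySem.Dict String (List String)) (chunk : List (String × String))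
    (h : ∀ s, d.contains s = pvKeyTest s) :
    pvStepA d chunk
      = if pvExcerpt chunk ≠ "" then d.modify (pvClassify chunk) [] (· ++ [pvExcerpt chunk]) else d := by
  simp only [pvStepA, h, ← pvExcerpt_eq, pvClassify_eq]

theorem pvStepA_contains (d : PySem.Dict String (List String)) (chunk : List (String × String))
    (h : ∀ s, d.contains s = pvKeyTest s) (s : String) :
    (pvStepA d chunk).contains s = pvKeyTest s := by
  rw [pvStepA_ctx d chunk h]
  split
  · rw [PySem.Dict.contains_modify, h]
    have := pvClassify_mem chunk
    by_cases hc : s = pvClassify chunk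
    · simp [hc, this]
    · simp [hc]
  · exact h s

-- the loop invariant: A's bucket for key c is the initial bucket plus B's rows filtered to c
theorem pvFoldA_getD (cs : List (List (String × String))) (d : PySem.Dict String (List String))
    (h : ∀ s, d.contains s = pvKeyTest s) (c : String) :
    (cs.foldl pvStepA d).getD c []
      = d.getD c [] ++ ((pvRows cs).filter (fun r => r.1 == c)).map (fun r => r.2) := by
  induction cs generalizing d with
  | nil => simp [pvRows]
  | cons chunk cs ih =>
    have hrows : pvRows (chunk :: cs)
        = (if pvExcerpt chunk ≠ "" then [(pvClassify chunk, pvExcerpt chunk)] else []) ++ pvRows cs := by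
      unfold pvRows; rw [List.filterMap_cons]; split <;> simp_all
    have h' : ∀ s, (pvStepA d chunk).contains s = pvKeyTest s := pvStepA_contains d chunk h
    rw [List.foldl_cons, ih _ h', pvStepA_ctx d chunk h, hrows]
    by_cases hex : pvExcerpt chunk ≠ ""
    · rw [if_pos hex, if_pos hex, PySem.Dict.getD_modify]
      by_cases hc : c = pvClassify chunk
      · simp [hc, List.append_assoc]
      · have hne : (pvClassify chunk == c) = false :=
          beq_eq_false_iff_ne.mpr (fun h'' => hc h''.symm)
        simp [hne, hc]
    · rw [if_neg hex, if_neg hex, List.nil_append]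

-- ===== VERDICT (by name: the statement is the Claim_ definition above) =====
theorem build_consolidation_input_py_spec : Claim_equal_build_consolidation_input_py := by
  intro entity_name chunks _
  unfold Spec_build_consolidation_input_py build_consolidation_input_py build_consolidation_input_py_alt
  have hcont : ∀ s, (PySem.Dict.mk [("work", ([] : List String)), ("personal_project", []), ("learning", []), ("observation", []), ("legacy", [])]).contains s = pvKeyTest s := by
    intro s
    simp only [PySem.Dict.contains_mk, pvKeyTest, List.any_cons, List.any_nil, Bool.or_false]
  have hd0 : ∀ c, (PySem.Dict.mk [("work", ([] : List String)), ("personal_project", []), ("learning", []), ("observation", []), ("legacy", [])]).getD c [] = [] := by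
    intro c
    simp [PySem.Dict.getD_eq_get?_getD, PySem.Dict.get?_mk_cons]
    repeat' split
    all_goals rfl
  have hfold : ∀ c, ((PySem.List.slice chunks none (some 12)).foldl pvStepA
      (PySem.Dict.mk [("work", []), ("personal_project", []), ("learning", []), ("observation", []), ("legacy", [])])).getD c []
      = ((pvRows (chunks.take 12)).filter (fun r => r.1 == c)).map (fun r => r.2) := by
    intro c
    rw [pvSlice12, pvFoldA_getD _ _ hcont c, hd0 c, List.nil_append]
  simp only [hfold]
  simp only [pvSections, List.foldl_cons, List.foldl_nil, pvSlice4, pvSlice3, pvRows,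
    ne_eq, pvTake4_eq_nil, pvTake3_eq_nil]
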